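-- pv_equiv track=rewrite | github.com/UmangBarewar/python_ref | Infosys1_.py | find_minimum_base
-- ===== SOURCE A (Python) =====
-- def find_minimum_base(M):
--     # Start with base B = 2
--     for B in range(2, M + 1):
--         # Let's represent the number M in base B
--         # Initialize an empty list to store digits
--         num_in_base_B = []
--         number = M
--
--         while number > 0:
--             num_in_base_B.append(number % B)
--             number //= B
--
--         # Check if all digits are the same
--         if all(d == num_in_base_B[0] for d in num_in_base_B):
--             return B
--
--     # If no base is found, return -1 (this case shouldn't normally happen)
--     return -1
-- ===== SOURCE B (Python) =====
-- def find_minimum_base(M):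
--     # Repdigit bases up to isqrt(M) are checked directly; larger bases give
--     # at most two digits, so they arise exactly as B = M//f - 1 for a small
--     # divisor f of M (digits [f, f]).  O(sqrt(M) log M) instead of A's O(M log M).
--     if M < 3:
--         return -1
--     r = 0
--     while (r + 1) * (r + 1) <= M:
--         r += 1
--     for B in range(2, r + 1):
--         d = M % B
--         n = M
--         while n > 0 and n % B == d:
--             n //= B
--         if n == 0:
--             return B
--     best = -1
--     for f in range(1, r + 1):
--         if M % f == 0:
--             B = M // f - 1
--             if B > r and f < B and (best == -1 or B < best):
--                 best = B
--     return best
-- ===== Notes on version B (the rewrite author's own statement) =====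
-- stated objective: faster
-- what changed: A tries every base from 2 up to M, building the full digit list for each; B only checks bases up to isqrt(M) directly (with an early-exit digit loop) and finds every larger repdigit base as the predecessor of a large divisor of M, since such bases yield at most two digits.
import Mathlib
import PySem

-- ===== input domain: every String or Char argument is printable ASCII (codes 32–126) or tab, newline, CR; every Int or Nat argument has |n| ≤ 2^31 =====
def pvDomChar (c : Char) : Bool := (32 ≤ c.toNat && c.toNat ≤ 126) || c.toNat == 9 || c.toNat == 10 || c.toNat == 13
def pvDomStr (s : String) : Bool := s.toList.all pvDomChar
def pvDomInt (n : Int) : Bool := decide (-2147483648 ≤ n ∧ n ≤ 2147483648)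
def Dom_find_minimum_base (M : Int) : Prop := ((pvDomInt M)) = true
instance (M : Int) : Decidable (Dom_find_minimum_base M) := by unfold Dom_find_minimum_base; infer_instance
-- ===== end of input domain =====

-- B replaces A's scan of every base 2..M by a scan of bases up to isqrt(M) plus a
-- divisor search for the two-digit repdigit bases; equivalence of return values is proved.

-- ===== PORT A =====
-- the inner while loop building num_in_base_B (2 ≤ B at every call site; the guard makes it total)
def pvDigits (B n : Int) : List Int :=
  if h : 0 < n ∧ 2 ≤ B then
    PySem.Int.mod n B :: pvDigits B (PySem.Int.floordiv n B)
  else []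
termination_by n.toNat
decreasing_by
  have h1 : PySem.Int.floordiv n B = n / B := PySem.Int.floordiv_eq_ediv_of_pos (by omega)
  have h2 : n / B < n := Int.ediv_lt_of_lt_mul (by omega) (by nlinarith [h.1])
  have h3 : 0 ≤ n / B := Int.ediv_nonneg (by omega) (by omega)
  simp [h1]; omega

-- the for loop over range(2, M+1) with its early return, as a counter recursion
-- (Python's range is lazy, so the loop is ported without materializing the range)
def pvALoop (M B : Int) : Int :=
  if B < M + 1 then
    let ds := pvDigits B M
    if ds.all (fun d => d == ds.headD 0) then B
    else pvALoop M (B + 1)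
  else -1
termination_by (M + 1 - B).toNat
decreasing_by omega

def find_minimum_base (M : Int) : Int := pvALoop M 2

-- ===== PORT B =====
-- while (r+1)*(r+1) <= M: r += 1   (0 ≤ r at every call site; the guard makes it total)
def pvIsqrt (M r : Int) : Int :=
  if h : (r + 1) * (r + 1) ≤ M ∧ 0 ≤ r then pvIsqrt M (r + 1) else r
termination_by (M - r).toNat
decreasing_by
  have : r + 1 ≤ (r + 1) * (r + 1) := by nlinarith [h.1, h.2]
  omega

-- while n > 0 and n % B == d: n //= B   (2 ≤ B at every call site; the guard makes it total)
def pvBLoop (B d n : Int) : Int :=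
  if h : 0 < n ∧ PySem.Int.mod n B = d ∧ 2 ≤ B then pvBLoop B d (PySem.Int.floordiv n B) else n
termination_by n.toNat
decreasing_by
  have h1 : PySem.Int.floordiv n B = n / B := PySem.Int.floordiv_eq_ediv_of_pos (by omega)
  have h2 : n / B < n := Int.ediv_lt_of_lt_mul (by omega) (by nlinarith [h.1])
  have h3 : 0 ≤ n / B := Int.ediv_nonneg (by omega) (by omega)
  simp [h1]; omega

-- for B in range(2, r+1) with its early return
def pvBScan (M : Int) : List Int → Option Int
  | [] => none
  | B :: rest =>
    if pvBLoop B (PySem.Int.mod M B) M = 0 then some B else pvBScan M rest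

-- for f in range(1, r+1): the divisor search accumulating best
def pvBDiv (M r : Int) : List Int → Int → Int
  | [], best => best
  | f :: rest, best =>
    if PySem.Int.mod M f = 0 then
      let B := PySem.Int.floordiv M f - 1
      if r < B ∧ f < B ∧ (best = -1 ∨ B < best) then pvBDiv M r rest B
      else pvBDiv M r rest best
    else pvBDiv M r rest best

def find_minimum_base_alt (M : Int) : Int :=
  if M < 3 then -1
  else
    let r := pvIsqrt M 0
    match pvBScan M (PySem.List.pyRange 2 (r + 1) 1) with
    | some B => B
    | none => pvBDiv M r (PySem.List.pyRange 1 (r + 1) 1) (-1)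

-- ===== PRECONDITION & SPEC =====
def Spec_find_minimum_base (M : Int) (out : Int) : Prop := out = find_minimum_base_alt M
instance (M : Int) (out : Int) : Decidable (Spec_find_minimum_base M out) := by unfold Spec_find_minimum_base; infer_instance

-- ===== CLAIM (what is proved, stated in full; the proofs are below) =====
def Claim_equal_find_minimum_base : Prop := ∀ (M : Int), Dom_find_minimum_base M → Spec_find_minimum_base M (find_minimum_base M)

-- ===== LEMMAS AND PROOFS =====

-- the repdigit property that both A's check and B's checks compute
def pvRep (M B : Int) : Prop := ∀ x ∈ pvDigits B M, x = M % B

-- list view of A's loop, for the proofs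
def pvAScan (M : Int) : List Int → Int
  | [] => -1
  | B :: rest =>
    let ds := pvDigits B M
    if ds.all (fun d => d == ds.headD 0) then B else pvAScan M rest

lemma pvALoop_eq_scan (M : Int) :
    ∀ B, pvALoop M B = pvAScan M (PySem.List.pyRange B (M + 1) 1) := by
  have key : ∀ n : ℕ, ∀ B, (M + 1 - B).toNat = n →
      pvALoop M B = pvAScan M (PySem.List.pyRange B (M + 1) 1) := by
    intro n
    induction n using Nat.strong_induction_on with
    | _ n ih =>
      intro B hn
      by_cases h : B < M + 1
      · rw [pvALoop, if_pos h, PySem.List.pyRange_one_cons (show B < M + 1 by omega), pvAScan]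
        show (if ((pvDigits B M).all fun d => d == (pvDigits B M).headD 0) = true then B
            else pvALoop M (B + 1)) =
          (if ((pvDigits B M).all fun d => d == (pvDigits B M).headD 0) = true then B
            else pvAScan M (PySem.List.pyRange (B + 1) (M + 1) 1))
        by_cases hc : ((pvDigits B M).all fun d => d == (pvDigits B M).headD 0) = true
        · rw [if_pos hc, if_pos hc]
        · rw [if_neg hc, if_neg hc]
          exact ih ((M + 1 - (B + 1)).toNat) (by omega) (B + 1) rfl
      · rw [pvALoop, if_neg h, PySem.List.pyRange_one_eq_nil (by omega)]
        rfl
  exact fun B => key ((M + 1 - B).toNat) B rfl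

lemma pvDigits_cons (B n : Int) (hn : 0 < n) (hB : 2 ≤ B) :
    pvDigits B n = n % B :: pvDigits B (n / B) := by
  rw [pvDigits]
  simp [hn, hB, PySem.Int.mod_eq_emod_of_pos (by omega : (0:Int) < B),
    PySem.Int.floordiv_eq_ediv_of_pos (by omega : (0:Int) < B)]

lemma pvDigits_nil (B n : Int) (hn : n ≤ 0) : pvDigits B n = [] := by
  rw [pvDigits]; simp; omega

lemma chkA_iff (M B : Int) (hM : 0 < M) (hB : 2 ≤ B) :
    ((pvDigits B M).all (fun d => d == (pvDigits B M).headD 0) = true) ↔ pvRep M B := by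
  rw [pvRep, pvDigits_cons B M hM hB]
  simp [List.all_eq_true]

lemma pvBLoop_eq_zero_iff (B d : Int) (hB : 2 ≤ B) :
    ∀ n, 0 ≤ n → (pvBLoop B d n = 0 ↔ ∀ x ∈ pvDigits B n, x = d) := by
  intro n
  induction n using pvBLoop.induct B d with
  | case1 n h ih =>
    intro hn
    obtain ⟨h1, h2, h3⟩ := h
    have hfd : PySem.Int.floordiv n B = n / B :=
      PySem.Int.floordiv_eq_ediv_of_pos (by omega)
    have hmd : PySem.Int.mod n B = n % B :=
      PySem.Int.mod_eq_emod_of_pos (by omega)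
    have hdig := pvDigits_cons B n h1 hB
    rw [pvBLoop]
    simp only [h1, h2, h3, and_self, dite_true, hdig, List.mem_cons]
    rw [hfd] at ih ⊢
    rw [ih (Int.ediv_nonneg (by omega) (by omega))]
    constructor
    · rintro ht x (rfl | hx)
      · omega
      · exact ht x hx
    · intro ht x hx; exact ht x (Or.inr hx)
  | case2 n h =>
    intro hn
    rw [pvBLoop]
    simp only [h, dite_false]
    by_cases h0 : n = 0
    · subst h0; simp [pvDigits_nil B 0 le_rfl]
    · have hpos : 0 < n := by omega
      have h2 : ¬ PySem.Int.mod n B = d := by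
        intro hc; exact h ⟨hpos, hc, hB⟩
      have hmd : PySem.Int.mod n B = n % B :=
        PySem.Int.mod_eq_emod_of_pos (by omega)
      rw [pvDigits_cons B n hpos hB]
      simp only [List.mem_cons]
      constructor
      · intro hc; omega
      · intro hc; exact absurd (hc _ (Or.inl rfl)) (by omega)

lemma pvIsqrt_spec (M : Int) :
    ∀ r, 0 ≤ r → r * r ≤ M →
      r ≤ pvIsqrt M r ∧ pvIsqrt M r * pvIsqrt M r ≤ M ∧
        M < (pvIsqrt M r + 1) * (pvIsqrt M r + 1) := by
  intro r
  induction r using pvIsqrt.induct M with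
  | case1 r h ih =>
    intro hr0 hrr
    obtain ⟨i1, i2, i3⟩ := ih (by omega) h.1
    rw [pvIsqrt]
    simp only [h, and_self, dite_true]
    exact ⟨by omega, i2, i3⟩
  | case2 r h =>
    intro hr0 hrr
    rw [pvIsqrt]
    simp only [h, dite_false]
    refine ⟨le_rfl, hrr, ?_⟩
    rcases not_and_or.mp h with hc | hc
    · omega
    · omega

-- B's base check agrees with A's base check
lemma chkB_iff (M B : Int) (hM : 0 < M) (hB : 2 ≤ B) :
    (pvBLoop B (PySem.Int.mod M B) M = 0) ↔ pvRep M B := by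
  rw [pvBLoop_eq_zero_iff B _ hB M (by omega), pvRep,
    PySem.Int.mod_eq_emod_of_pos (by omega : (0:Int) < B)]

lemma scans_agree (M : Int) (hM : 0 < M) :
    ∀ l l', (∀ B ∈ l, 2 ≤ B) →
      pvAScan M (l ++ l') =
        (match pvBScan M l with | some x => x | none => pvAScan M l') := by
  intro l
  induction l with
  | nil => intro l' _; rfl
  | cons B rest ih =>
    intro l' hmem
    have hB : 2 ≤ B := hmem B (List.mem_cons_self ..)
    by_cases hP : pvRep M B
    · have hA : ((pvDigits B M).all (fun d => d == (pvDigits B M).headD 0)) = true :=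
        (chkA_iff M B hM hB).mpr hP
      have hBc : pvBLoop B (PySem.Int.mod M B) M = 0 := (chkB_iff M B hM hB).mpr hP
      simp only [List.cons_append, pvAScan, pvBScan, hA, hBc, ite_true]
    · have hA : ((pvDigits B M).all (fun d => d == (pvDigits B M).headD 0)) = false := by
        rw [Bool.eq_false_iff]; intro hc; exact hP ((chkA_iff M B hM hB).mp hc)
      have hBc : ¬ pvBLoop B (PySem.Int.mod M B) M = 0 := by
        intro hc; exact hP ((chkB_iff M B hM hB).mp hc)
      simp only [List.cons_append, pvAScan, pvBScan, hA, hBc, if_false, Bool.false_eq_true]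
      exact ih l' (fun x hx => hmem x (List.mem_cons_of_mem _ hx))

-- For bases above the integer square root, repdigit ⇔ two equal digits ⇔ (B+1) ∣ M with small quotient
lemma two_digit_char (M B r : Int) (hM : 3 ≤ M) (hr0 : 0 ≤ r) (hrM : M < (r + 1) * (r + 1))
    (hB1 : r < B) (hB2 : B ≤ M) (hB3 : 2 ≤ B) :
    pvRep M B ↔ ((B + 1) ∣ M ∧ M / (B + 1) < B) := by
  have hBpos : (0:Int) < B := by omega
  have hBB : M < B * B := lt_of_lt_of_le hrM (by nlinarith)
  set q := M / B with hq
  set rem := M % B with hrem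
  have hq1 : 1 ≤ q := Int.le_ediv_iff_mul_le hBpos |>.mpr (by omega)
  have hqB : q < B := Int.ediv_lt_iff_lt_mul hBpos |>.mpr hBB
  have hremB : rem < B := Int.emod_lt_of_pos M hBpos
  have hrem0 : 0 ≤ rem := Int.emod_nonneg M (by omega)
  have hMqr : B * q + rem = M := Int.mul_ediv_add_emod M B
  have hdig : pvDigits B M = [rem, q] := by
    rw [pvDigits_cons B M (by omega) hB3, pvDigits_cons B q (by omega) hB3,
      pvDigits_nil B (q / B) (by exact le_of_eq (Int.ediv_eq_zero_of_lt (by omega) hqB)),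
      Int.emod_eq_of_lt (by omega) hqB]
  have hrep : pvRep M B ↔ q = rem := by
    rw [pvRep, hdig]; simp [← hrem]
  rw [hrep]
  constructor
  · intro hqr
    have hexp : (B + 1) * q = B * q + q := by ring
    have hdvd : (B + 1) ∣ M := ⟨q, by omega⟩
    refine ⟨hdvd, ?_⟩
    have : M / (B + 1) = q := by
      rw [show M = (B + 1) * q by omega]
      exact Int.mul_ediv_cancel_left q (by omega)
    omega
  · rintro ⟨⟨d, hd⟩, hlt⟩
    have hexp : (B + 1) * d = B * d + d := by ring
    have hcomm : B * d = d * B := mul_comm B d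
    have hdq : M / (B + 1) = d := by
      rw [hd]; exact Int.mul_ediv_cancel_left d (by omega)
    rw [hdq] at hlt
    have hd1 : 1 ≤ d := by nlinarith
    have : M / B = d ∧ M % B = d := by
      constructor
      · rw [show M = d + d * B by omega, Int.add_mul_ediv_right _ _ (by omega : B ≠ 0),
          Int.ediv_eq_zero_of_lt (by omega) (by omega)]
        omega
      · rw [show M = d + B * d by omega, Int.add_mul_emod_self_left]
        exact Int.emod_eq_of_lt (by omega) (by omega)
    omega

-- acceptance condition of B's divisor loop
def pvAcc (M r f : Int) : Prop :=
  PySem.Int.mod M f = 0 ∧ r < PySem.Int.floordiv M f - 1 ∧ f < PySem.Int.floordiv M f - 1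

lemma pvBDiv_mem (M r : Int) :
    ∀ l (best : Int), pvBDiv M r l best = best ∨
      ∃ f ∈ l, pvAcc M r f ∧ pvBDiv M r l best = PySem.Int.floordiv M f - 1 := by
  intro l
  induction l with
  | nil => intro best; left; rfl
  | cons g t ih =>
    intro best
    rw [pvBDiv]
    by_cases h0 : PySem.Int.mod M g = 0
    · simp only [h0, if_true]
      by_cases hc : r < PySem.Int.floordiv M g - 1 ∧ g < PySem.Int.floordiv M g - 1 ∧
          (best = -1 ∨ PySem.Int.floordiv M g - 1 < best)
      · simp only [if_pos hc]
        rcases ih (PySem.Int.floordiv M g - 1) with h | ⟨f, hf, ha, he⟩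
        · right; exact ⟨g, List.mem_cons_self .., ⟨h0, hc.1, hc.2.1⟩, h⟩
        · right; exact ⟨f, List.mem_cons_of_mem _ hf, ha, he⟩
      · simp only [if_neg hc]
        rcases ih best with h | ⟨f, hf, ha, he⟩
        · left; exact h
        · right; exact ⟨f, List.mem_cons_of_mem _ hf, ha, he⟩
    · simp only [if_neg h0]
      rcases ih best with h | ⟨f, hf, ha, he⟩
      · left; exact h
      · right; exact ⟨f, List.mem_cons_of_mem _ hf, ha, he⟩

lemma pvBDiv_le_best (M r : Int) (hr : 0 ≤ r) :
    ∀ l (best : Int), best ≠ -1 → pvBDiv M r l best ≤ best := by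
  intro l
  induction l with
  | nil => intro best _; exact le_rfl
  | cons g t ih =>
    intro best hb
    rw [pvBDiv]
    by_cases h0 : PySem.Int.mod M g = 0
    · simp only [h0, if_true]
      by_cases hc : r < PySem.Int.floordiv M g - 1 ∧ g < PySem.Int.floordiv M g - 1 ∧
          (best = -1 ∨ PySem.Int.floordiv M g - 1 < best)
      · simp only [if_pos hc]
        have h1 : PySem.Int.floordiv M g - 1 < best := by
          rcases hc.2.2 with h | h
          · exact absurd h hb
          · exact h
        have := ih (PySem.Int.floordiv M g - 1) (by omega)
        omega
      · simp only [if_neg hc]; exact ih best hb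
    · simp only [if_neg h0]; exact ih best hb

lemma pvBDiv_le_cand (M r : Int) (hr : 0 ≤ r) :
    ∀ l (best f : Int), f ∈ l → pvAcc M r f →
      pvBDiv M r l best ≤ PySem.Int.floordiv M f - 1 := by
  intro l
  induction l with
  | nil => intro best f hf; exact absurd hf (List.not_mem_nil)
  | cons g t ih =>
    intro best f hf ha
    rw [pvBDiv]
    rcases List.mem_cons.mp hf with rfl | hft
    · simp only [ha.1, if_true]
      by_cases hc : r < PySem.Int.floordiv M f - 1 ∧ f < PySem.Int.floordiv M f - 1 ∧
          (best = -1 ∨ PySem.Int.floordiv M f - 1 < best)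
      · simp only [if_pos hc]
        exact pvBDiv_le_best M r hr t _ (by have := ha.2.1; omega)
      · simp only [if_neg hc]
        have hble : best ≠ -1 ∧ ¬ (PySem.Int.floordiv M f - 1 < best) := by
          rcases Classical.em (best = -1) with hb | hb
          · exact absurd ⟨ha.2.1, ha.2.2, Or.inl hb⟩ hc
          · exact ⟨hb, fun hlt => hc ⟨ha.2.1, ha.2.2, Or.inr hlt⟩⟩
        have := pvBDiv_le_best M r hr t best hble.1
        omega
    · by_cases h0 : PySem.Int.mod M g = 0
      · simp only [h0, if_true]
        by_cases hc : r < PySem.Int.floordiv M g - 1 ∧ g < PySem.Int.floordiv M g - 1 ∧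
            (best = -1 ∨ PySem.Int.floordiv M g - 1 < best)
        · simp only [if_pos hc]; exact ih _ f hft ha
        · simp only [if_neg hc]; exact ih _ f hft ha
      · simp only [if_neg h0]; exact ih _ f hft ha

lemma pvBDiv_ne (M r : Int) (hr : 0 ≤ r) :
    ∀ l (best : Int), best ≠ -1 → pvBDiv M r l best ≠ -1 := by
  intro l best hb
  rcases pvBDiv_mem M r l best with h | ⟨f, _, ha, he⟩
  · omega
  · have := ha.2.1; omega

lemma pvBDiv_hit (M r : Int) (hr : 0 ≤ r) :
    ∀ l (best : Int), best = -1 → (∃ f ∈ l, pvAcc M r f) → pvBDiv M r l best ≠ -1 := by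
  intro l
  induction l with
  | nil => rintro best hb ⟨f, hf, _⟩; exact absurd hf (List.not_mem_nil)
  | cons g t ih =>
    rintro best hb ⟨f, hf, ha⟩
    rw [pvBDiv]
    rcases List.mem_cons.mp hf with rfl | hft
    · have hcond : r < PySem.Int.floordiv M f - 1 ∧ f < PySem.Int.floordiv M f - 1 ∧
          (best = -1 ∨ PySem.Int.floordiv M f - 1 < best) := ⟨ha.2.1, ha.2.2, Or.inl hb⟩
      simp only [ha.1, if_true, if_pos hcond]
      exact pvBDiv_ne M r hr t _ (by have := ha.2.1; omega)
    · by_cases h0 : PySem.Int.mod M g = 0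
      · simp only [h0, if_true]
        by_cases hc : r < PySem.Int.floordiv M g - 1 ∧ g < PySem.Int.floordiv M g - 1 ∧
            (best = -1 ∨ PySem.Int.floordiv M g - 1 < best)
        · simp only [if_pos hc]
          exact pvBDiv_ne M r hr t _ (by have := hc.1; omega)
        · simp only [if_neg hc]; exact ih best hb ⟨f, hft, ha⟩
      · simp only [if_neg h0]; exact ih best hb ⟨f, hft, ha⟩

-- accepted divisor index ↦ a large repdigit base
lemma accept_to_base (M r f : Int) (hM : 3 ≤ M) (hr0 : 0 ≤ r) (hrM : M < (r + 1) * (r + 1))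
    (hf1 : 1 ≤ f) (ha : pvAcc M r f) :
    r < PySem.Int.floordiv M f - 1 ∧ PySem.Int.floordiv M f - 1 ≤ M ∧
      pvRep M (PySem.Int.floordiv M f - 1) := by
  have hfd : PySem.Int.floordiv M f = M / f := PySem.Int.floordiv_eq_ediv_of_pos (by omega)
  have hmd : PySem.Int.mod M f = M % f := PySem.Int.mod_eq_emod_of_pos (by omega)
  obtain ⟨h0, h1, h2⟩ := ha
  rw [hfd] at h1 h2 ⊢
  have hdvd : f ∣ M := Int.dvd_of_emod_eq_zero (by rw [← hmd]; exact h0)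
  set B := M / f - 1 with hB
  have hBM : B ≤ M := by
    have := Int.ediv_le_self f (by omega : (0:Int) ≤ M)
    omega
  have hMf : (M / f) * f = M := Int.ediv_mul_cancel hdvd
  have hMf2 : M = (B + 1) * f := by
    have hx : (B + 1) * f = (M / f) * f := by rw [hB]; ring
    omega
  have hdvd2 : (B + 1) ∣ M := ⟨f, hMf2⟩
  have hr1 : 1 ≤ r := by nlinarith
  refine ⟨h1, hBM, ?_⟩
  rw [two_digit_char M B r hM hr0 hrM h1 hBM (by omega)]
  refine ⟨hdvd2, ?_⟩
  have : M / (B + 1) = f := by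
    rw [show M = (B + 1) * f from hMf2]
    exact Int.mul_ediv_cancel_left f (by omega)
  omega

-- a large repdigit base ↦ an accepted divisor index
lemma base_to_accept (M r B : Int) (hM : 3 ≤ M) (hr0 : 0 ≤ r) (hrr : r * r ≤ M)
    (hrM : M < (r + 1) * (r + 1)) (hB1 : r < B) (hB2 : B ≤ M) (hrep : pvRep M B) :
    ∃ f, 1 ≤ f ∧ f ≤ r ∧ pvAcc M r f ∧ PySem.Int.floordiv M f - 1 = B := by
  have hr1 : 1 ≤ r := by nlinarith
  have hB3 : 2 ≤ B := by omega
  obtain ⟨hdvd, hlt⟩ := (two_digit_char M B r hM hr0 hrM hB1 hB2 hB3).mp hrep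
  set d := M / (B + 1) with hd
  obtain ⟨d', hd'⟩ := hdvd
  have hdd' : d = d' := by
    rw [hd, hd']; exact Int.mul_ediv_cancel_left d' (by omega)
  have hMeq : M = (B + 1) * d := by rw [hdd']; exact hd'
  have hd1 : 1 ≤ d := by nlinarith
  have hdr : d ≤ r := by nlinarith
  have hfd : PySem.Int.floordiv M d = M / d := PySem.Int.floordiv_eq_ediv_of_pos (by omega)
  have hmd : PySem.Int.mod M d = M % d := PySem.Int.mod_eq_emod_of_pos (by omega)
  have hMd : M / d = B + 1 := by
    rw [show M = d * (B + 1) from by rw [hMeq]; ring]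
    exact Int.mul_ediv_cancel_left (B + 1) (by omega)
  refine ⟨d, hd1, hdr, ⟨?_, ?_, ?_⟩, ?_⟩
  · rw [hmd]; exact Int.emod_eq_zero_of_dvd ⟨B + 1, by rw [hMeq]; ring⟩
  · rw [hfd, hMd]; omega
  · rw [hfd, hMd]; omega
  · rw [hfd, hMd]; omega

lemma pvAScan_allfail (M : Int) (hM : 0 < M) :
    ∀ l l', (∀ B ∈ l, 2 ≤ B ∧ ¬ pvRep M B) → pvAScan M (l ++ l') = pvAScan M l' := by
  intro l
  induction l with
  | nil => intro l' _; rfl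
  | cons B t ih =>
    intro l' h
    obtain ⟨hB, hP⟩ := h B (List.mem_cons_self ..)
    have hA : ((pvDigits B M).all (fun d => d == (pvDigits B M).headD 0)) = false := by
      rw [Bool.eq_false_iff]; intro hc; exact hP ((chkA_iff M B hM hB).mp hc)
    simp only [List.cons_append, pvAScan, hA, Bool.false_eq_true, if_false]
    exact ih l' (fun x hx => h x (List.mem_cons_of_mem _ hx))

lemma pvAScan_first (M B₀ : Int) (hM : 0 < M) (hB₀ : 2 ≤ B₀) (hrep : pvRep M B₀) :
    ∀ a b, a ≤ B₀ → B₀ < b → 2 ≤ a → (∀ x, a ≤ x → x < B₀ → ¬ pvRep M x) →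
      pvAScan M (PySem.List.pyRange a b 1) = B₀ := by
  intro a b ha hb ha2 hfail
  rw [PySem.List.pyRange_one_append a B₀ b (by omega) (by omega),
    PySem.List.pyRange_one_cons (by omega : B₀ < b)]
  rw [pvAScan_allfail M hM (PySem.List.pyRange a B₀ 1) (B₀ :: PySem.List.pyRange (B₀ + 1) b 1) (by
    intro x hx
    have := (PySem.List.mem_pyRange_one).mp hx
    exact ⟨by omega, hfail x (by omega) (by omega)⟩)]
  have hA : ((pvDigits B₀ M).all (fun d => d == (pvDigits B₀ M).headD 0)) = true :=
    (chkA_iff M B₀ hM hB₀).mpr hrep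
  simp only [pvAScan, hA, if_true]

lemma pvBScan_none (M : Int) :
    ∀ l, pvBScan M l = none → ∀ B ∈ l, pvBLoop B (PySem.Int.mod M B) M ≠ 0 := by
  intro l
  induction l with
  | nil => intro _ B hB; exact absurd hB (List.not_mem_nil)
  | cons g t ih =>
    intro hn B hB
    rw [pvBScan] at hn
    by_cases h0 : pvBLoop g (PySem.Int.mod M g) M = 0
    · simp [h0] at hn
    · simp only [if_neg h0] at hn
      rcases List.mem_cons.mp hB with rfl | hBt
      · exact h0
      · exact ih hn B hBt

-- least repdigit base in (r, M]
lemma exists_min_base (M r : Int) (hr : 0 ≤ r) (hS : ∃ B, r < B ∧ B ≤ M ∧ pvRep M B) :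
    ∃ B₀, (r < B₀ ∧ B₀ ≤ M ∧ pvRep M B₀) ∧
      ∀ x, r < x → x ≤ M → pvRep M x → B₀ ≤ x := by
  classical
  obtain ⟨B, h1, h2, h3⟩ := hS
  have hQ : ∃ n : ℕ, r + 1 + (n : Int) ≤ M ∧ pvRep M (r + 1 + n) := by
    refine ⟨(B - r - 1).toNat, ?_, ?_⟩
    · rw [Int.toNat_of_nonneg (by omega)]; omega
    · rw [Int.toNat_of_nonneg (by omega)]
      have : r + 1 + (B - r - 1) = B := by ring
      rw [this]; exact h3
  refine ⟨r + 1 + (Nat.find hQ : Int), ⟨by omega, (Nat.find_spec hQ).1, (Nat.find_spec hQ).2⟩, ?_⟩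
  intro x hx1 hx2 hx3
  have hn : r + 1 + ((x - r - 1).toNat : Int) ≤ M ∧ pvRep M (r + 1 + (x - r - 1).toNat) := by
    rw [Int.toNat_of_nonneg (by omega)]
    constructor
    · omega
    · have : r + 1 + (x - r - 1) = x := by ring
      rw [this]; exact hx3
  have := Nat.find_min' hQ hn
  omega

lemma case2 (M r : Int) (hM : 3 ≤ M) (hr0 : 0 ≤ r) (hrr : r * r ≤ M)
    (hrM : M < (r + 1) * (r + 1))
    (hfail : ∀ B, 2 ≤ B → B ≤ r → ¬ pvRep M B) :
    pvAScan M (PySem.List.pyRange (r + 1) (M + 1) 1) =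
      pvBDiv M r (PySem.List.pyRange 1 (r + 1) 1) (-1) := by
  have hr1 : 1 ≤ r := by nlinarith
  have hM1 : r < M - 1 := by nlinarith
  have hrepM1 : pvRep M (M - 1) := by
    rw [two_digit_char M (M - 1) r hM hr0 hrM hM1 (by omega) (by omega)]
    constructor
    · rw [show M - 1 + 1 = M by ring]
    · rw [show M - 1 + 1 = M by ring, Int.ediv_self (by omega)]; omega
  obtain ⟨B₀, ⟨hb1, hb2, hb3⟩, hmin⟩ := exists_min_base M r hr0 ⟨M - 1, hM1, by omega, hrepM1⟩
  have hL : pvAScan M (PySem.List.pyRange (r + 1) (M + 1) 1) = B₀ :=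
    pvAScan_first M B₀ (by omega) (by omega) hb3 (r + 1) (M + 1) (by omega) (by omega) (by omega)
      (fun x hx1 hx2 hrepx => by have := hmin x (by omega) (by omega) hrepx; omega)
  obtain ⟨f₀, hf1, hf2, hacc, hfB⟩ := base_to_accept M r B₀ hM hr0 hrr hrM hb1 hb2 hb3
  have hf₀mem : f₀ ∈ PySem.List.pyRange 1 (r + 1) 1 :=
    PySem.List.mem_pyRange_one.mpr ⟨by omega, by omega⟩
  have hle : pvBDiv M r (PySem.List.pyRange 1 (r + 1) 1) (-1) ≤ B₀ := by
    rw [← hfB]; exact pvBDiv_le_cand M r hr0 _ _ f₀ hf₀mem hacc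
  have hne : pvBDiv M r (PySem.List.pyRange 1 (r + 1) 1) (-1) ≠ -1 :=
    pvBDiv_hit M r hr0 _ (-1) rfl ⟨f₀, hf₀mem, hacc⟩
  have hgr : B₀ ≤ pvBDiv M r (PySem.List.pyRange 1 (r + 1) 1) (-1) := by
    rcases pvBDiv_mem M r (PySem.List.pyRange 1 (r + 1) 1) (-1) with h | ⟨f, hfm, hfa, hfe⟩
    · exact absurd h hne
    · have hfr := PySem.List.mem_pyRange_one.mp hfm
      obtain ⟨c1, c2, c3⟩ := accept_to_base M r f hM hr0 hrM (by omega) hfa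
      rw [hfe]
      exact hmin _ c1 c2 c3
  omega

lemma main_eq (M : Int) : find_minimum_base M = find_minimum_base_alt M := by
  by_cases hM3 : M < 3
  · rw [find_minimum_base_alt, if_pos hM3]
    by_cases hM1 : M ≤ 1
    · rw [find_minimum_base, pvALoop_eq_scan M 2, PySem.List.pyRange_one_eq_nil (by omega)]; rfl
    · have hM2 : M = 2 := by omega
      subst hM2
      have hd : pvDigits 2 2 = [0, 1] := by
        rw [pvDigits_cons 2 2 (by norm_num) (by norm_num)]
        norm_num
        rw [pvDigits_cons 2 1 (by norm_num) (by norm_num)]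
        norm_num
        exact pvDigits_nil 2 0 le_rfl
      rw [find_minimum_base, pvALoop_eq_scan 2 2, show (2:Int) + 1 = 2 + 1 from rfl,
        PySem.List.pyRange_one_singleton]
      simp [pvAScan, hd]
  · have hM : 3 ≤ M := by omega
    obtain ⟨hge, hrr, hrM⟩ := pvIsqrt_spec M 0 le_rfl (by omega)
    set r := pvIsqrt M 0 with hr
    have hr0 : 0 ≤ r := hge
    have hr1 : 1 ≤ r := by
      by_contra hc
      have : r = 0 := by omega
      rw [this] at hrM
      norm_num at hrM
      omega
    have hrM' : r ≤ M := by nlinarith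
    have halt : find_minimum_base_alt M =
        (match pvBScan M (PySem.List.pyRange 2 (r + 1) 1) with
          | some B => B
          | none => pvBDiv M r (PySem.List.pyRange 1 (r + 1) 1) (-1)) := by
      rw [find_minimum_base_alt, if_neg hM3]
    rw [find_minimum_base, pvALoop_eq_scan M 2, halt,
      PySem.List.pyRange_one_append 2 (r + 1) (M + 1) (by omega) (by omega),
      scans_agree M (by omega) _ _
        (fun B hB => ((PySem.List.mem_pyRange_one).mp hB).1)]
    cases hscan : pvBScan M (PySem.List.pyRange 2 (r + 1) 1) with
    | some B => rfl
    | none =>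
      simp only []
      apply case2 M r hM hr0 hrr hrM
      intro B hB2 hBr hrep
      have hmem : B ∈ PySem.List.pyRange 2 (r + 1) 1 :=
        PySem.List.mem_pyRange_one.mpr ⟨by omega, by omega⟩
      exact (pvBScan_none M _ hscan B hmem) ((chkB_iff M B (by omega) hB2).mpr hrep)

-- ===== VERDICT (by name: the statement is the Claim_ definition above) =====
theorem find_minimum_base_spec : Claim_equal_find_minimum_base := by
  intro M _
  unfold Spec_find_minimum_base
  exact main_eq M
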